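-- pv_equiv track=rewrite | github.com/jamesfgibbons/tgflightsfromnyc | completed/src/api.py | get_date_range_from_rows
-- ===== SOURCE A (Python) =====
-- def get_date_range_from_rows(rows):
--     """Extract date range from CSV rows for MIDI track naming."""
--     try:
--         dates = [row.get("date") for row in rows if row.get("date")]
--         if not dates:
--             return "no-date"
--
--         min_date = min(dates)
--         max_date = max(dates)
--
--         if min_date == max_date:
--             return str(min_date).replace("-", "")
--         else:
--             return f"{min_date}_{max_date}".replace("-", "")
--     except:
--         return "unknown-date"
-- ===== SOURCE B (Python) =====
-- def get_date_range_from_rows(rows):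
--     """Extract date range from CSV rows for MIDI track naming (single-pass)."""
--     try:
--         lo = hi = None
--         for row in rows:
--             d = row.get("date")
--             if not d:
--                 continue
--             if lo is None:
--                 lo = hi = d
--             else:
--                 if d < lo:
--                     lo = d
--                 if hi < d:
--                     hi = d
--         if lo is None:
--             return "no-date"
--         if lo == hi:
--             return str(lo).replace("-", "")
--         return f"{lo}_{hi}".replace("-", "")
--     except:
--         return "unknown-date"
-- ===== Notes on version B (the rewrite author's own statement) =====
-- stated objective: alternative
-- what changed: Replaces the build-a-filtered-list-then-two-pass-min/max decomposition with a single explicit loop over rows maintaining lo/hi running extrema (no intermediate list, one pass).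
import Mathlib
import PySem

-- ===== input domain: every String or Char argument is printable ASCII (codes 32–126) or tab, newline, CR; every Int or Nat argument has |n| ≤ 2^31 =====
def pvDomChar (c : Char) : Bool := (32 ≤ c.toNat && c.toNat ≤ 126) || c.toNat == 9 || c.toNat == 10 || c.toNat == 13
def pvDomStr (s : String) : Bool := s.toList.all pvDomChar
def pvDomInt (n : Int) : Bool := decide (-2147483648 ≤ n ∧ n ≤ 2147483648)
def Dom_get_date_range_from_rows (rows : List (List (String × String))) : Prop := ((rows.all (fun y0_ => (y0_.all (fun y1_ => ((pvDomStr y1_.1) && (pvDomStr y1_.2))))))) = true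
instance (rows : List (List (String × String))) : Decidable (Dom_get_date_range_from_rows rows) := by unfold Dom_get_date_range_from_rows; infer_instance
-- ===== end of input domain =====

-- B replaces A's filtered-list-then-two-pass-min/max by a single loop over the rows
-- maintaining running lo/hi extrema (alternative decomposition, no intermediate list).

-- shared helper: row.get("date") if it is truthy (non-empty), else none
def pvRowDate (row : List (String × String)) : Option String :=
  match (PySem.Dict.mk row).get? "date" with
  | some s => if s = "" then none else some s
  | none => none

-- ===== PORT A =====
def get_date_range_from_rows (rows : List (List (String × String))) : String :=
  let dates := rows.filterMap pvRowDate
  if dates.isEmpty then "no-date"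
  else
    match PySem.List.min? dates (fun x => x), PySem.List.max? dates (fun x => x) with
    | some min_date, some max_date =>
        if min_date = max_date then PySem.Str.replace min_date "-" ""
        else PySem.Str.replace (PySem.Str.join "" [min_date, "_", max_date]) "-" ""
    | _, _ => "unknown-date"   -- min/max of an empty list would raise: the bare except

-- ===== PORT B =====
-- one loop step: skip rows with no truthy date, else update the running (lo, hi)
def pvStep (acc : Option (String × String)) (row : List (String × String)) :
    Option (String × String) :=
  match pvRowDate row with
  | none => acc
  | some d =>
      match acc with
      | none => some (d, d)
      | some (lo, hi) => some ((if d < lo then d else lo), (if hi < d then d else hi))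

def get_date_range_from_rows_alt (rows : List (List (String × String))) : String :=
  match rows.foldl pvStep none with
  | none => "no-date"
  | some (lo, hi) =>
      if lo = hi then PySem.Str.replace lo "-" ""
      else PySem.Str.replace (PySem.Str.join "" [lo, "_", hi]) "-" ""

-- ===== PRECONDITION & SPEC =====
def Spec_get_date_range_from_rows (rows : List (List (String × String))) (out : String) : Prop := out = get_date_range_from_rows_alt rows
instance (rows : List (List (String × String))) (out : String) : Decidable (Spec_get_date_range_from_rows rows out) := by unfold Spec_get_date_range_from_rows; infer_instance

-- ===== CLAIM (what is proved, stated in full; the proofs are below) =====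
def Claim_equal_get_date_range_from_rows : Prop := ∀ (rows : List (List (String × String))), Dom_get_date_range_from_rows rows → Spec_get_date_range_from_rows rows (get_date_range_from_rows rows)

-- ===== LEMMAS AND PROOFS =====

-- the loop step seen on the filtered dates only
def pvComb (acc : Option (String × String)) (d : String) : Option (String × String) :=
  match acc with
  | none => some (d, d)
  | some (lo, hi) => some ((if d < lo then d else lo), (if hi < d then d else hi))

lemma pvStep_eq_comb (acc : Option (String × String)) (row : List (String × String)) :
    pvStep acc row = match pvRowDate row with | none => acc | some d => pvComb acc d := by
  unfold pvStep pvComb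
  cases pvRowDate row <;> rfl

lemma foldl_step_eq_foldl_comb (rows : List (List (String × String)))
    (acc : Option (String × String)) :
    rows.foldl pvStep acc = (rows.filterMap pvRowDate).foldl pvComb acc := by
  induction rows generalizing acc with
  | nil => rfl
  | cons r rs ih =>
      simp only [List.foldl_cons, List.filterMap_cons, pvStep_eq_comb]
      cases pvRowDate r <;> simp [ih]

lemma pv_if_lt_eq_min (lo d : String) : (if d < lo then d else lo) = min lo d := by
  rw [min_def]
  split_ifs with h1 h2 h3
  · exact absurd h1 (not_lt.mpr h2)
  · rfl
  · rfl
  · exact absurd (not_lt.mp h1) h3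

lemma pv_if_lt_eq_max (hi d : String) : (if hi < d then d else hi) = max hi d := by
  rw [max_def]
  split_ifs with h1 h2 h3
  · rfl
  · exact absurd (le_of_lt h1) h2
  · exact le_antisymm h3 (not_lt.mp h1)
  · rfl

lemma foldl_comb_some (ds : List String) (lo hi : String) :
    ds.foldl pvComb (some (lo, hi)) = some (ds.foldl min lo, ds.foldl max hi) := by
  induction ds generalizing lo hi with
  | nil => rfl
  | cons d ds ih =>
      simp only [List.foldl_cons, pvComb, pv_if_lt_eq_min, pv_if_lt_eq_max]
      exact ih _ _

-- ===== VERDICT (by name: the statement is the Claim_ definition above) =====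
theorem get_date_range_from_rows_spec : Claim_equal_get_date_range_from_rows := by
  intro rows _
  unfold Spec_get_date_range_from_rows get_date_range_from_rows get_date_range_from_rows_alt
  rw [foldl_step_eq_foldl_comb]
  cases h : rows.filterMap pvRowDate with
  | nil => simp
  | cons d ds =>
      simp only [List.isEmpty_cons, List.foldl_cons, pvComb, foldl_comb_some,
        PySem.List.min?_id_cons, PySem.List.max?_id_cons, Bool.false_eq_true, if_false]
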